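-- pv_equiv track=rewrite | github.com/Liefellin/Python_practice | Files/Sudoku.py | compile_text
-- ===== SOURCE A (Python) =====
-- def compile_text(text):
--     """This function is loaned from another program. It determines what characters an iterable has and in what number."""
--     letters = {}
--     for character in text:
--         if character.isalnum():
--             if character in letters:
--                 letters[character] += 1
--             else:
--                 letters[character] = 1
--     return letters
-- ===== SOURCE B (Python) =====
-- def compile_text(text):
--     """Divide-and-conquer: filter the alnum characters once, then recursively count
--     halves and merge the two count dicts."""
--     chars = [c for c in text if c.isalnum()]
--
--     def count_range(lo, hi):
--         if hi - lo == 0: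
--             return {}
--         if hi - lo == 1:
--             return {chars[lo]: 1}
--         mid = (lo + hi) // 2
--         counts = count_range(lo, mid)
--         for k, v in count_range(mid, hi).items():
--             counts[k] = counts.get(k, 0) + v
--         return counts
--
--     return count_range(0, len(chars))
-- ===== Notes on version B (the rewrite author's own statement) =====
-- stated objective: alternative
-- what changed: Replaces A's single-pass incremental dict accumulation with a divide-and-conquer scheme: filter the alnum characters once, recursively count the two halves of the filtered list, and merge the two count dicts.
import Mathlib
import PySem

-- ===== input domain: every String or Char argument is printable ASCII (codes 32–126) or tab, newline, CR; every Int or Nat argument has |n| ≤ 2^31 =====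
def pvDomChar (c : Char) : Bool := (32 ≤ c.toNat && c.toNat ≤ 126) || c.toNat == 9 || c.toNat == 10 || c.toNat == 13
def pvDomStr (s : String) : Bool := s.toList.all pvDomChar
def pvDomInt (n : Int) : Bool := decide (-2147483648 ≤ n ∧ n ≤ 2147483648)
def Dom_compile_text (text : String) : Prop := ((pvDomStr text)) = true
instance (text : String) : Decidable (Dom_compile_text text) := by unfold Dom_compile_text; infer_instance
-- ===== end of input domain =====

-- B replaces A's single-pass incremental dict accumulation with divide and conquer:
-- filter the alnum characters once, recursively count each half of the filtered list
-- and merge the two count dicts. Objective: alternative algorithm, same behaviour.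

-- ===== PORT A =====
-- letters = {}; for character in text: if character.isalnum(): increment-or-initialise
def compile_text (text : String) : List (String × Int) :=
  (text.toList.foldl
    (fun (letters : PySem.Dict String Int) character =>
      if PySem.Chars.isalnum character then
        if letters.contains (String.ofList [character]) then
          letters.insert (String.ofList [character]) (letters.getD (String.ofList [character]) 0 + 1)
        else
          letters.insert (String.ofList [character]) 1
      else letters)
    PySem.Dict.empty).items

-- ===== PORT B =====
-- for k, v in right.items(): counts[k] = counts.get(k, 0) + v
def mergeCounts (d e : PySem.Dict String Int) : PySem.Dict String Int :=
  e.items.foldl (fun d p => d.insert p.1 (d.getD p.1 0 + p.2)) d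

-- count_range(lo, hi) over chars[lo:hi], rendered on the sublist itself;
-- fuel = initial list length is only a totality device (never exhausted on the calls made)
def dcCountFuel (fuel : Nat) (l : List Char) : PySem.Dict String Int :=
  match fuel with
  | 0 => PySem.Dict.empty
  | fuel + 1 =>
    if l.length = 0 then PySem.Dict.empty
    else if l.length = 1 then PySem.Dict.empty.insert (String.ofList [l.headI]) 1
    else
      mergeCounts (dcCountFuel fuel (l.take (l.length / 2)))
        (dcCountFuel fuel (l.drop (l.length / 2)))

-- chars = [c for c in text if c.isalnum()]; return count_range(0, len(chars))
def compile_text_alt (text : String) : List (String × Int) :=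
  ((dcCountFuel (text.toList.filter (fun c => PySem.Chars.isalnum c)).length
    (text.toList.filter (fun c => PySem.Chars.isalnum c)))).items

-- ===== PRECONDITION & SPEC =====
def Spec_compile_text (text : String) (out : List (String × Int)) : Prop := out = compile_text_alt text
instance (text : String) (out : List (String × Int)) : Decidable (Spec_compile_text text out) := by unfold Spec_compile_text; infer_instance

-- ===== CLAIM (what is proved, stated in full; the proofs are below) =====
def Claim_equal_compile_text : Prop := ∀ (text : String), Dom_compile_text text → Spec_compile_text text (compile_text text)

-- ===== LEMMAS AND PROOFS =====

-- the key map c ↦ String.ofList [c] is injective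
theorem key_inj : Function.Injective (fun c : Char => String.ofList [c]) := by
  intro a b h
  simpa using congrArg String.toList h

-- A's loop body is the counter step on the key
theorem stepA_eq (d : PySem.Dict String Int) (k : String) :
    (if d.contains k then d.insert k (d.getD k 0 + 1) else d.insert k 1) =
      d.insert k (d.getD k 0 + 1) := by
  by_cases h : d.contains k = true
  · simp [h]
  · have h' : d.contains k = false := by simpa using h
    rw [PySem.Dict.getD_of_not_contains (h := h')]
    simp [h']

-- A's fold, with its step rewritten to the counter step over the mapped keys
theorem foldA_eq (fs : List Char) (d : PySem.Dict String Int) :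
    fs.foldl
      (fun (letters : PySem.Dict String Int) character =>
        if letters.contains (String.ofList [character]) then
          letters.insert (String.ofList [character])
            (letters.getD (String.ofList [character]) 0 + 1)
        else
          letters.insert (String.ofList [character]) 1) d
    = (fs.map (fun c => String.ofList [c])).foldl
        (fun (d : PySem.Dict String Int) k => d.insert k (d.getD k 0 + 1)) d := by
  induction fs generalizing d with
  | nil => rfl
  | cons c t ih =>
    simp only [List.foldl_cons, List.map_cons]
    rw [stepA_eq, ih]

-- Set.ofList commutes with mapping an injective function
theorem ofList_map_inj {α β : Type} [DecidableEq α] [DecidableEq β]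
    (f : α → β) (hf : Function.Injective f) (l : List α) :
    PySem.Set.ofList (l.map f) = (PySem.Set.ofList l).map f := by
  induction l using List.reverseRecOn with
  | nil => rfl
  | append_singleton xs x ih =>
    simp only [List.map_append, List.map_cons, List.map_nil]
    rw [show PySem.Set.ofList (xs.map f ++ [f x]) =
          PySem.Set.add (PySem.Set.ofList (xs.map f)) (f x) by
        simp [PySem.Set.ofList_eq_foldl],
        show PySem.Set.ofList (xs ++ [x]) = PySem.Set.add (PySem.Set.ofList xs) x by
        simp [PySem.Set.ofList_eq_foldl],
        ih]
    unfold PySem.Set.add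
    by_cases hx : x ∈ PySem.Set.ofList xs
    · have : f x ∈ (PySem.Set.ofList xs).map f := List.mem_map_of_mem hx
      simp [hx, this, PySem.Set.contains]
    · have : f x ∉ (PySem.Set.ofList xs).map f := by
        intro hm
        obtain ⟨y, hy, hxy⟩ := List.mem_map.mp hm
        exact hx (hf hxy ▸ hy)
      simp [hx, this, PySem.Set.contains]

-- A's result, characterised: first-appearance-ordered distinct keys with their counts
theorem compile_text_canon (text : String) :
    compile_text text =
      (PySem.List.dedup (text.toList.filter (fun c => PySem.Chars.isalnum c))).map
        (fun c => (String.ofList [c],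
          ((text.toList.filter (fun c => PySem.Chars.isalnum c)).count c : Int))) := by
  unfold compile_text
  rw [PySem.List.foldl_if_eq_foldl_filter (p := fun c => PySem.Chars.isalnum c)]
  set fs := text.toList.filter (fun c => PySem.Chars.isalnum c) with hfs
  rw [foldA_eq, PySem.Dict.foldl_insert_getD_add_one_eq_counter, PySem.Dict.items_counter,
      ofList_map_inj _ key_inj, List.map_map]
  refine List.map_congr_left ?_
  intro c hc
  simp only [Function.comp]
  congr 1
  exact_mod_cast List.count_map_of_injective fs _ key_inj c

-- canonical shape: this dict's items are the dedup'd chars of l with their counts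
def Canon (l : List Char) (d : PySem.Dict String Int) : Prop :=
  d.items = (PySem.List.dedup l).map
    (fun c => (String.ofList [c], ((l.count c : Int))))

theorem canon_keys {l : List Char} {d : PySem.Dict String Int} (h : Canon l d) :
    d.keys = (PySem.List.dedup l).map (fun c => String.ofList [c]) := by
  simp only [PySem.Dict.keys]
  rw [h, List.map_map]
  rfl

theorem canon_nodup_keys {l : List Char} {d : PySem.Dict String Int} (h : Canon l d) :
    d.keys.Nodup := by
  rw [canon_keys h]
  exact (PySem.List.nodup_dedup l).map_on
    (fun a _ b _ hab => key_inj hab)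

theorem canon_getD {l : List Char} {d : PySem.Dict String Int} (h : Canon l d) (c : Char) :
    d.getD (String.ofList [c]) 0 = (l.count c : Int) := by
  by_cases hc : c ∈ PySem.List.dedup l
  · have hmem : (String.ofList [c], ((l.count c : Int))) ∈ d.items := by
      rw [h]
      exact List.mem_map_of_mem hc
    exact PySem.Dict.getD_of_mem_items d hmem (canon_nodup_keys h) 0
  · have hc' : c ∉ l := fun hm => hc ((PySem.List.mem_dedup l c).mpr hm)
    have hcont : d.contains (String.ofList [c]) = false := by
      rw [PySem.Dict.contains_eq_decide_mem_keys, canon_keys h]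
      simp only [decide_eq_false_iff_not, List.mem_map]
      rintro ⟨y, hy, hxy⟩
      exact hc (key_inj hxy ▸ hy)
    rw [PySem.Dict.getD_of_not_contains (h := hcont)]
    simp [List.count_eq_zero_of_not_mem hc']

-- folding the merge step over a nodup pairs list: lookups add
theorem getD_foldl_merge (ps : List (String × Int)) (hnd : (ps.map Prod.fst).Nodup)
    (d : PySem.Dict String Int) (k : String) :
    (ps.foldl (fun d p => d.insert p.1 (d.getD p.1 0 + p.2)) d).getD k 0 =
      d.getD k 0 + (((ps.filter (fun p => p.1 == k)).map Prod.snd).sum) := by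
  induction ps generalizing d with
  | nil => simp
  | cons p t ih =>
    simp only [List.map_cons, List.nodup_cons] at hnd
    simp only [List.foldl_cons, List.filter_cons]
    rw [ih hnd.2]
    by_cases hk : p.1 = k
    · have ht : t.filter (fun q => q.1 == k) = [] := by
        apply List.filter_eq_nil_iff.mpr
        intro q hq
        simp only [beq_iff_eq]
        intro hqk
        have hq1 : q.1 ∈ t.map Prod.fst := List.mem_map_of_mem hq
        rw [hqk, ← hk] at hq1
        exact hnd.1 hq1
      subst hk
      simp only [ht, BEq.rfl, if_pos, List.map_cons, List.map_nil, List.sum_cons,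
        List.sum_nil, PySem.Dict.getD_insert_self]
      ring
    · rw [PySem.Dict.getD_insert_of_ne (hne := fun h => hk h.symm)]
      simp [show (p.1 == k) = false by simpa using hk]

-- Set.add commutes with an injective map
theorem add_map_inj {α β : Type} [DecidableEq α] [DecidableEq β]
    (f : α → β) (hf : Function.Injective f) (s : List α) (x : α) :
    PySem.Set.add (s.map f) (f x) = (PySem.Set.add s x).map f := by
  rw [PySem.Set.add_eq_ite, PySem.Set.add_eq_ite]
  by_cases hx : x ∈ s
  · simp [hx, List.mem_map_of_mem hx]
  · have : f x ∉ s.map f := by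
      intro hm
      obtain ⟨y, hy, hxy⟩ := List.mem_map.mp hm
      exact hx (hf hxy ▸ hy)
    simp [hx, this]

-- Set.update commutes with an injective map
theorem update_map_inj {α β : Type} [DecidableEq α] [DecidableEq β]
    (f : α → β) (hf : Function.Injective f) (s xs : List α) :
    PySem.Set.update (s.map f) (xs.map f) = (PySem.Set.update s xs).map f := by
  induction xs generalizing s with
  | nil => simp [PySem.Set.update_nil]
  | cons x t ih =>
    simp only [List.map_cons]
    rw [PySem.Set.update_cons, PySem.Set.update_cons, add_map_inj f hf, ih]

-- updating with a dedup'd list is updating with the list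
theorem update_ofList {α : Type} [DecidableEq α] (s xs : List α) :
    PySem.Set.update s (PySem.Set.ofList xs) = PySem.Set.update s xs := by
  rw [PySem.Set.update_eq_append_filter, PySem.Set.update_eq_append_filter,
      PySem.Set.ofList_ofList]

-- in a nodup list containing c, filtering (· == c) leaves exactly [c]
theorem filter_beq_of_nodup {α : Type} [DecidableEq α] {s : List α} (h : s.Nodup)
    {c : α} (hc : c ∈ s) : s.filter (fun x => x == c) = [c] := by
  induction s with
  | nil => simp at hc
  | cons a t ih =>
    simp only [List.nodup_cons] at h
    rw [List.filter_cons]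
    rcases List.mem_cons.mp hc with h1 | h2
    · subst h1
      have : t.filter (fun x => x == c) = [] := by
        apply List.filter_eq_nil_iff.mpr
        intro q hq hqc
        exact h.1 ((beq_iff_eq.mp hqc) ▸ hq)
      simp [this]
    · have hac : (a == c) = false := by
        simp only [beq_eq_false_iff_ne, ne_eq]
        intro e
        exact h.1 (e ▸ h2)
      simp only [hac]
      exact ih h.2 h2

-- the merge of two canonical dicts is canonical for the concatenation
theorem mergeCounts_canon {l1 l2 : List Char} {d e : PySem.Dict String Int}
    (hd : Canon l1 d) (he : Canon l2 e) : Canon (l1 ++ l2) (mergeCounts d e) := by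
  unfold mergeCounts Canon
  have hndk : (e.items.map Prod.fst).Nodup := canon_nodup_keys he
  have hknd : (e.items.foldl (fun d p => d.insert p.1 (d.getD p.1 0 + p.2)) d).keys.Nodup :=
    PySem.Dict.nodup_keys_foldl_insert_key e.items Prod.fst
      (fun d p => d.getD p.1 0 + p.2) d (canon_nodup_keys hd)
  -- keys of the merged dict: first-appearance union
  have hkeys : (e.items.foldl (fun d p => d.insert p.1 (d.getD p.1 0 + p.2)) d).keys =
      (PySem.List.dedup (l1 ++ l2)).map (fun c => String.ofList [c]) := by
    rw [PySem.Dict.keys_foldl_insert_key (key := Prod.fst) (l := e.items)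
        (f := fun d p => d.getD p.1 0 + p.2) (d := d),
        show e.items.map Prod.fst = e.keys from rfl,
        canon_keys hd, canon_keys he]
    simp only [PySem.List.dedup_eq_ofList]
    rw [update_map_inj _ key_inj, update_ofList, ← PySem.Set.ofList_append]
  -- lookups in the merged dict: counts add
  have hget : ∀ c : Char,
      (e.items.foldl (fun d p => d.insert p.1 (d.getD p.1 0 + p.2)) d).getD
        (String.ofList [c]) 0 = (((l1 ++ l2).count c : Int)) := by
    intro c
    rw [getD_foldl_merge e.items hndk d, canon_getD hd c]
    have hfun : (fun p : String × Int => p.1 == String.ofList [c]) ∘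
        (fun c' : Char => (String.ofList [c'], ((l2.count c' : Int)))) =
        (fun c' : Char => c' == c) := by
      funext x
      simp only [Function.comp]
      by_cases hx : x = c
      · simp [hx]
      · have h1 : (String.ofList [x] == String.ofList [c]) = false := by
          simp only [beq_eq_false_iff_ne, ne_eq]
          exact fun h => hx (key_inj h)
        have h2 : (x == c) = false := by simpa using hx
        rw [h1, h2]
    have hfil : (e.items.filter (fun p => p.1 == String.ofList [c])).map Prod.snd =
        ((PySem.List.dedup l2).filter (fun c' => c' == c)).map
          (fun c' => ((l2.count c' : Int))) := by
      rw [he, List.filter_map, hfun, List.map_map]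
      rfl
    rw [hfil]
    by_cases hc : c ∈ PySem.List.dedup l2
    · rw [filter_beq_of_nodup (PySem.List.nodup_dedup l2) hc]
      simp only [List.map_cons, List.map_nil, List.sum_cons, List.sum_nil,
        List.count_append]
      push_cast
      ring
    · have hc' : c ∉ l2 := fun hm => hc ((PySem.List.mem_dedup l2 c).mpr hm)
      have : (PySem.List.dedup l2).filter (fun c' => c' == c) = [] := by
        apply List.filter_eq_nil_iff.mpr
        intro q hq
        simp only [beq_iff_eq]
        intro hqc
        exact hc (hqc ▸ hq)
      rw [this]
      simp only [List.map_nil, List.sum_nil, List.count_append,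
        List.count_eq_zero_of_not_mem hc']
      push_cast
      ring
  -- items of the merged dict from its keys and lookups
  rw [PySem.Dict.items_eq_map_keys _ hknd 0, hkeys, List.map_map]
  refine List.map_congr_left ?_
  intro c _
  simp only [Function.comp]
  rw [hget c]

theorem canon_nil : Canon [] PySem.Dict.empty := by
  unfold Canon
  rfl

theorem dcCountFuel_canon (fuel : Nat) (l : List Char) (hle : l.length ≤ fuel) :
    Canon l (dcCountFuel fuel l) := by
  induction fuel generalizing l with
  | zero =>
    rw [List.length_eq_zero_iff.mp (Nat.le_zero.mp hle)]
    exact canon_nil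
  | succ fuel ih =>
    simp only [dcCountFuel]
    by_cases h0 : l.length = 0
    · rw [if_pos h0, List.length_eq_zero_iff.mp h0]
      exact canon_nil
    · rw [if_neg h0]
      by_cases h1 : l.length = 1
      · rw [if_pos h1]
        obtain ⟨c, hc⟩ := List.length_eq_one_iff.mp h1
        subst hc
        unfold Canon
        rw [PySem.Dict.items_insert_of_not_contains _ _ (by simp)]
        simp [PySem.List.dedup_eq_ofList, PySem.Set.ofList, PySem.Set.add,
          PySem.Set.contains, List.headI]
        rfl
      · rw [if_neg h1]
        have hl := List.take_append_drop (l.length / 2) l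
        have h2 : 2 ≤ l.length := by omega
        have hcanon := mergeCounts_canon
          (ih (l.take (l.length / 2)) (by simp only [List.length_take]; omega))
          (ih (l.drop (l.length / 2)) (by simp only [List.length_drop]; omega))
        rwa [hl] at hcanon

-- ===== VERDICT (by name: the statement is the Claim_ definition above) =====
theorem compile_text_spec : Claim_equal_compile_text := by
  intro text _
  unfold Spec_compile_text compile_text_alt
  rw [compile_text_canon]
  exact (dcCountFuel_canon _ (text.toList.filter (fun c => PySem.Chars.isalnum c))
    le_rfl).symm
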